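-- pv_equiv track=rewrite | github.com/park-geun-hyeong/Algorithm | Implementation/baekjoon_21610.py | MovingCloud
-- ===== SOURCE A (Python) =====
-- def MovingCloud(cloud,graph,n, d, s):
--
--     drow = [0,0,-1,-1,-1,0,1,1,1]
--     dcol = [0,-1,-1,0,1,1,1,0,-1]
--     new_cloud = []
--     cloud_graph = [[0]*n for _ in range(n)]
--     for row, col in cloud:
-- #         cnt = 0
-- #         while True:
-- #             nrow = row + drow[d]
-- #             ncol = col + dcol[d]
--
-- #             if nrow > n-1:
-- #                 nrow = 0
-- #             elif nrow < 0:
-- #                 nrow = n-1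
--
-- #             if ncol > n-1:
-- #                 ncol = 0
-- #             elif ncol < 0:
-- #                 ncol = n-1
--
-- #             cnt += 1
-- #             if cnt == s:
-- #                 break
-- #             row = nrow
-- #             col = ncol
--         nrow = (row + drow[d] * s)%n
--         ncol = (col + dcol[d] * s)%n
--
--         new_cloud.append((nrow, ncol))
--         cloud_graph[nrow][ncol] = 1
--         graph[nrow][ncol] += 1
--
--     return new_cloud, graph, cloud_graph
-- ===== SOURCE B (Python) =====
-- def MovingCloud(cloud, graph, n, d, s):
--     drow = [0,0,-1,-1,-1,0,1,1,1]
--     dcol = [0,-1,-1,0,1,1,1,0,-1]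
--
--     def move(row, col):
--         dr = drow[d]
--         dc = dcol[d]
--         row %= n
--         col %= n
--         for _ in range(s % n):
--             row += dr
--             if row > n - 1:
--                 row = 0
--             elif row < 0:
--                 row = n - 1
--             col += dc
--             if col > n - 1:
--                 col = 0
--             elif col < 0:
--                 col = n - 1
--         return row, col
--
--     # pass 1: destinations of all clouds
--     dests = [move(r, c) for r, c in cloud]
--     # pass 2: add rain to graph
--     for r, c in dests:
--         graph[r][c] += 1
--     # pass 3: mark occupied cells
--     cloud_graph = [[0] * n for _ in range(n)]
--     for r, c in dests:
--         cloud_graph[r][c] = 1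
--     return dests, graph, cloud_graph
-- ===== Notes on version B (the rewrite author's own statement) =====
-- stated objective: alternative
-- what changed: B replaces A's single fold (closed-form modular jump plus two in-place grid updates per cloud) by three staged passes: first each cloud's destination is computed by simulating s%n single-cell steps with explicit border wraparound, then the destination list is applied to graph in a second pass and to a fresh cloud_graph in a third.
import Mathlib
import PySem

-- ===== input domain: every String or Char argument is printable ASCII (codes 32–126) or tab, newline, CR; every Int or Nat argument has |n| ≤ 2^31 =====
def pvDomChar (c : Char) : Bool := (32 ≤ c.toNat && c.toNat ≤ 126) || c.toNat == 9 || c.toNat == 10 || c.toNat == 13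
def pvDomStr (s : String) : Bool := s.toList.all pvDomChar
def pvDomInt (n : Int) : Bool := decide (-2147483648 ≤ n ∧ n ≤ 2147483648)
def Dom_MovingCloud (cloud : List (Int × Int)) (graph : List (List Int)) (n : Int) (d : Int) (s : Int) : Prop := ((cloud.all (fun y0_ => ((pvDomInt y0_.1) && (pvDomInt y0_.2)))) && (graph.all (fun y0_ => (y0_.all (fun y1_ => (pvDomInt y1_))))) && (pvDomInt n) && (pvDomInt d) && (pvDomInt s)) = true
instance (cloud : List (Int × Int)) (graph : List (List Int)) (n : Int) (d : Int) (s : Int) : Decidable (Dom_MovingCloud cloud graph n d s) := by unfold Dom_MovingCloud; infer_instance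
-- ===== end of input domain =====

-- B splits A's single fold into three staged passes (destinations by step simulation, then the two
-- grid updates); equivalence is about the RETURN value only (both Pythons also mutate the argument
-- `graph` in place, in the same way).

-- ===== PORT A =====

-- `g[i][j] = f(g[i][j])` on a nested list (both Pythons update grid cells this way)
def pvUpdCell (g : List (List Int)) (i j : Int) (f : Int → Int) : List (List Int) :=
  let row := PySem.List.pyGetD g i []
  PySem.List.pySetD g i (PySem.List.pySetD row j (f (PySem.List.pyGetD row j 0)))

def MovingCloud (cloud : List (Int × Int)) (graph : List (List Int)) (n : Int) (d : Int) (s : Int) : (List (Int × Int)) × List (List Int) × List (List Int) :=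
  let drow : List Int := [0, 0, -1, -1, -1, 0, 1, 1, 1]
  let dcol : List Int := [0, -1, -1, 0, 1, 1, 1, 0, -1]
  let cg0 : List (List Int) := List.replicate n.toNat (List.replicate n.toNat 0)
  cloud.foldl
    (fun st rc =>
      let nrow := PySem.Int.mod (rc.1 + PySem.List.pyGetD drow d 0 * s) n
      let ncol := PySem.Int.mod (rc.2 + PySem.List.pyGetD dcol d 0 * s) n
      (st.1 ++ [(nrow, ncol)],
       pvUpdCell st.2.1 nrow ncol (· + 1),
       pvUpdCell st.2.2 nrow ncol (fun _ => 1)))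
    ([], graph, cg0)

-- ===== PORT B =====

-- one single-cell step in direction (dr, dc): move the row and wrap it, then the column
def pvWrapStep (n dr dc : Int) (rc : Int × Int) : Int × Int :=
  let r0 := rc.1 + dr
  let r := if r0 > n - 1 then 0 else if r0 < 0 then n - 1 else r0
  let c0 := rc.2 + dc
  let c := if c0 > n - 1 then 0 else if c0 < 0 then n - 1 else c0
  (r, c)

-- `move`: normalize into the grid, then s % n single-cell steps
def pvMove (n d s : Int) (rc : Int × Int) : Int × Int :=
  let dr := PySem.List.pyGetD [0, 0, -1, -1, -1, 0, 1, 1, 1] d 0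
  let dc := PySem.List.pyGetD [0, -1, -1, 0, 1, 1, 1, 0, -1] d 0
  (List.range (PySem.Int.mod s n).toNat).foldl (fun q _ => pvWrapStep n dr dc q)
    (PySem.Int.mod rc.1 n, PySem.Int.mod rc.2 n)

def MovingCloud_alt (cloud : List (Int × Int)) (graph : List (List Int)) (n : Int) (d : Int) (s : Int) : (List (Int × Int)) × List (List Int) × List (List Int) :=
  let dests := cloud.map (pvMove n d s)
  let graph1 := dests.foldl (fun g p => pvUpdCell g p.1 p.2 (· + 1)) graph
  let cg := dests.foldl (fun g p => pvUpdCell g p.1 p.2 (fun _ => 1))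
    (List.replicate n.toNat (List.replicate n.toNat 0))
  (dests, graph1, cg)

-- ===== PRECONDITION & SPEC =====
-- Pre_ excludes inputs on which A raises (n ≤ 0 or d outside [-9,8] with cloud nonempty), and graphs
-- smaller than n×n, on which A raises unless every reached cell happens to exist (B returns the same
-- value whenever A returns there).
def Pre_MovingCloud (cloud : List (Int × Int)) (graph : List (List Int)) (n : Int) (d : Int) (s : Int) : Prop :=
  cloud = [] ∨
  (1 ≤ n ∧ -9 ≤ d ∧ d ≤ 8 ∧ n ≤ (graph.length : Int) ∧
   (∀ row ∈ graph.take n.toNat, n ≤ (row.length : Int)))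
instance (cloud : List (Int × Int)) (graph : List (List Int)) (n : Int) (d : Int) (s : Int) : Decidable (Pre_MovingCloud cloud graph n d s) := by unfold Pre_MovingCloud; infer_instance

def pvWitness_MovingCloud : (List (Int × Int)) × List (List Int) × Int × Int × Int :=
  ([(0, 0), (1, 1)], [[0, 0], [0, 0]], 2, 4, 3)

def Spec_MovingCloud (cloud : List (Int × Int)) (graph : List (List Int)) (n : Int) (d : Int) (s : Int) (out : (List (Int × Int)) × List (List Int) × List (List Int)) : Prop := out = MovingCloud_alt cloud graph n d s
instance (cloud : List (Int × Int)) (graph : List (List Int)) (n : Int) (d : Int) (s : Int) (out : (List (Int × Int)) × List (List Int) × List (List Int)) : Decidable (Spec_MovingCloud cloud graph n d s out) := by unfold Spec_MovingCloud; infer_instance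

-- ===== CLAIM (what is proved, stated in full; the proofs are below) =====
def Claim_equal_MovingCloud : Prop := ∀ (cloud : List (Int × Int)) (graph : List (List Int)) (n : Int) (d : Int) (s : Int), Dom_MovingCloud cloud graph n d s → Pre_MovingCloud cloud graph n d s → Spec_MovingCloud cloud graph n d s (MovingCloud cloud graph n d s)

-- ===== LEMMAS AND PROOFS =====

-- A's single fold over clouds splits into: the destination list, and one fold over it per grid
lemma pvFold_fission {α γ δ : Type} (f : α → Int × Int) (g : γ → Int × Int → γ) (h : δ → Int × Int → δ)
    (xs : List α) : ∀ (acc : List (Int × Int)) (a : γ) (b : δ),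
    xs.foldl (fun st x => (st.1 ++ [f x], g st.2.1 (f x), h st.2.2 (f x))) (acc, a, b)
      = (acc ++ xs.map f, (xs.map f).foldl g a, (xs.map f).foldl h b) := by
  induction xs with
  | nil => intro acc a b; simp
  | cons x xs ih =>
      intro acc a b
      simp only [List.foldl_cons, List.map_cons, ih, List.append_assoc, List.singleton_append]

-- one wrapping step from an in-range coordinate is a %n step
lemma pvWrap_one (n dr x : Int) (hn : 1 ≤ n) (hdr : -1 ≤ dr ∧ dr ≤ 1) (hx : 0 ≤ x ∧ x < n) :
    (if x + dr > n - 1 then 0 else if x + dr < 0 then n - 1 else x + dr) = (x + dr) % n := by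
  split_ifs with h1 h2
  · have hx : x + dr = n := by omega
    rw [hx, Int.emod_self]
  · have hx : x + dr = -1 := by omega
    rw [hx, show (-1 : Int) = (n - 1) + n * (-1) by ring, Int.add_mul_emod_self_left,
        Int.emod_eq_of_lt (by omega) (by omega)]
  · rw [Int.emod_eq_of_lt (by omega) (by omega)]

-- iterating the step k times from an in-range cell equals the closed form
lemma pvStep_iter (n dr dc r c : Int) (hn : 1 ≤ n) (hdr : -1 ≤ dr ∧ dr ≤ 1) (hdc : -1 ≤ dc ∧ dc ≤ 1)
    (hr : 0 ≤ r ∧ r < n) (hc : 0 ≤ c ∧ c < n) (k : Nat) :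
    (List.range k).foldl (fun q _ => pvWrapStep n dr dc q) (r, c)
      = ((r + dr * k) % n, (c + dc * k) % n) := by
  induction k with
  | zero =>
      simp [Int.emod_eq_of_lt hr.1 hr.2, Int.emod_eq_of_lt hc.1 hc.2]
  | succ k ih =>
      rw [List.range_succ, List.foldl_append, ih]
      simp only [List.foldl_cons, List.foldl_nil, pvWrapStep]
      have hn0 : (0:Int) < n := by omega
      have h1 : 0 ≤ (r + dr * k) % n ∧ (r + dr * k) % n < n :=
        ⟨Int.emod_nonneg _ (by omega), Int.emod_lt_of_pos _ hn0⟩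
      have h2 : 0 ≤ (c + dc * k) % n ∧ (c + dc * k) % n < n :=
        ⟨Int.emod_nonneg _ (by omega), Int.emod_lt_of_pos _ hn0⟩
      rw [pvWrap_one n dr _ hn hdr h1, pvWrap_one n dc _ hn hdc h2,
          Int.emod_add_emod, Int.emod_add_emod]
      push_cast; ring_nf

lemma pvMod_shift (n dr x s : Int) (hn : 1 ≤ n) :
    (PySem.Int.mod x n + dr * (s % n)) % n = PySem.Int.mod (x + dr * s) n := by
  rw [PySem.Int.mod_eq_emod_of_pos (by omega), PySem.Int.mod_eq_emod_of_pos (by omega),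
      Int.emod_add_emod, Int.add_emod, Int.mul_emod, Int.emod_emod_of_dvd _ dvd_rfl,
      ← Int.mul_emod, ← Int.add_emod]

lemma pvDir_small (x : Int) (hx : x ∈ ([0, 0, -1, -1, -1, 0, 1, 1, 1] : List Int)) : -1 ≤ x ∧ x ≤ 1 := by
  fin_cases hx <;> omega
lemma pvDir_small' (x : Int) (hx : x ∈ ([0, -1, -1, 0, 1, 1, 1, 0, -1] : List Int)) : -1 ≤ x ∧ x ≤ 1 := by
  fin_cases hx <;> omega

-- B's simulated move equals A's closed-form jump (d in range, n ≥ 1)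
lemma pvMove_closed (n d s : Int) (rc : Int × Int) (hn : 1 ≤ n) (hd1 : -9 ≤ d) (hd2 : d ≤ 8) :
    pvMove n d s rc
      = (PySem.Int.mod (rc.1 + PySem.List.pyGetD [0, 0, -1, -1, -1, 0, 1, 1, 1] d 0 * s) n,
         PySem.Int.mod (rc.2 + PySem.List.pyGetD [0, -1, -1, 0, 1, 1, 1, 0, -1] d 0 * s) n) := by
  have hin : PySem.Raise.InRange (9 : Nat) d := by
    simp [PySem.Raise.InRange]; omega
  have hdr := pvDir_small _ (PySem.List.pyGetD_mem (xs := [0, 0, -1, -1, -1, 0, 1, 1, 1]) (i := d) (d := 0) hin)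
  have hdc := pvDir_small' _ (PySem.List.pyGetD_mem (xs := [0, -1, -1, 0, 1, 1, 1, 0, -1]) (i := d) (d := 0) hin)
  have hn0 : (0:Int) < n := by omega
  have hr : 0 ≤ PySem.Int.mod rc.1 n ∧ PySem.Int.mod rc.1 n < n :=
    ⟨PySem.Int.mod_nonneg _ (by omega), PySem.Int.mod_lt _ hn0⟩
  have hc : 0 ≤ PySem.Int.mod rc.2 n ∧ PySem.Int.mod rc.2 n < n :=
    ⟨PySem.Int.mod_nonneg _ (by omega), PySem.Int.mod_lt _ hn0⟩
  have hk : ((PySem.Int.mod s n).toNat : Int) = s % n := by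
    rw [Int.toNat_of_nonneg (PySem.Int.mod_nonneg _ (by omega)),
        PySem.Int.mod_eq_emod_of_pos (by omega)]
  unfold pvMove
  rw [pvStep_iter n _ _ _ _ hn hdr hdc hr hc, hk,
      pvMod_shift _ _ _ _ hn, pvMod_shift _ _ _ _ hn]

-- ===== VERDICT (by name: the statement is the Claim_ definition above) =====
theorem MovingCloud_spec : Claim_equal_MovingCloud := by
  intro cloud graph n d s _ hpre
  show MovingCloud cloud graph n d s = MovingCloud_alt cloud graph n d s
  rcases hpre with hnil | ⟨hn, hd1, hd2, _, _⟩
  · subst hnil; rfl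
  · unfold MovingCloud MovingCloud_alt
    have hfis := pvFold_fission
      (fun rc : Int × Int =>
        (PySem.Int.mod (rc.1 + PySem.List.pyGetD [0, 0, -1, -1, -1, 0, 1, 1, 1] d 0 * s) n,
         PySem.Int.mod (rc.2 + PySem.List.pyGetD [0, -1, -1, 0, 1, 1, 1, 0, -1] d 0 * s) n))
      (fun g p => pvUpdCell g p.1 p.2 (· + 1))
      (fun g p => pvUpdCell g p.1 p.2 (fun _ => 1))
      cloud [] graph (List.replicate n.toNat (List.replicate n.toNat 0))
    have hmap : cloud.map
        (fun rc : Int × Int =>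
          (PySem.Int.mod (rc.1 + PySem.List.pyGetD [0, 0, -1, -1, -1, 0, 1, 1, 1] d 0 * s) n,
           PySem.Int.mod (rc.2 + PySem.List.pyGetD [0, -1, -1, 0, 1, 1, 1, 0, -1] d 0 * s) n))
        = cloud.map (pvMove n d s) := by
      apply List.map_congr_left
      intro rc _
      exact (pvMove_closed n d s rc hn hd1 hd2).symm
    rw [hmap] at hfis
    simpa using hfis
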